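-- pv_equiv track=rewrite | github.com/carlospuenteg/FishLib | num2n.py | n2n
-- ===== SOURCE A (Python) =====
-- def n2n(num, iters):
--     ######## Number to list #######################
--     num = str(num) # Number to string ("19264")
--     numLi = list(num[:]) # numLi = num in a list ("1","9","2","6","4")
--     numLi = [int(x) for x in numLi] # numLi = numLi list with ints  ((1,9,2,6,4))
--     ###############################################
--     tSum = (sum(numLi)+1)**2  # (23)
--     pSum = tSum  # (23)
--     ###############################################
--     for _ in range(0,iters):
--         for x in range(0,len(numLi)):
--             numLi[x] = int(str(numLi[x]+pSum)[-1])
--             pSum -= numLi[x]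
--         tSum += sum(numLi)+1
--         pSum = tSum
--     if (numLi[0] == 0):
--         numLi[0] += 1
--     num = [str(x) for x in numLi]
--     num = int("".join(num))
--     return num
-- ===== SOURCE B (Python) =====
-- def n2n(num, iters):
--     # B: after a bounded warm-up (tSum >= 9*len once, <= 9*len+? passes), each pass of A's
--     # sequential remainder loop provably equals a parallel adjacent-difference map
--     # d -> [(d[0]+t) % 10] + [(d[i]-d[i-1]) % 10 ...] with t' = 2*t + d[-1] + 1 (mod 10),
--     # so the main phase keeps no remainder accumulator and only t mod 10.
--     d = [ord(c) - 48 for c in str(num)]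
--     n = len(d)
--     t = (sum(d) + 1) ** 2
--     k = 0
--     while k < iters and t < 9 * n:
--         # exact low-t pass (the remainder can go negative here)
--         p = t
--         for x in range(n):
--             d[x] = abs(d[x] + p) % 10
--             p -= d[x]
--         t += sum(d) + 1
--         k += 1
--     tm = t % 10
--     for _ in range(k, iters):
--         last = d[-1]
--         d = [(d[0] + tm) % 10] + [(d[i] - d[i - 1]) % 10 for i in range(1, n)]
--         tm = (2 * tm + last + 1) % 10
--     if d[0] == 0:
--         d[0] = 1
--     return int("".join(map(str, d)))
-- ===== Notes on version B (the rewrite author's own statement) =====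
-- stated objective: faster
-- what changed: B proves that once tSum >= 9*len(digits) the remainder pSum can never drive a digit negative, and in that regime A's sequential per-digit remainder loop collapses to a parallel adjacent-difference map d -> [(d[0]+t)%10] + [(d[i]-d[i-1])%10 ...] with the closed-form update t -> (2t + d[-1] + 1) mod 10; so B runs at most a bounded warm-up (tSum grows every pass, so < 9*len(digits) passes) of the exact pass and then iterates the difference map keeping only t mod 10 and no remainder accumulator, with no per-digit str/int round-trips.
import Mathlib
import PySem

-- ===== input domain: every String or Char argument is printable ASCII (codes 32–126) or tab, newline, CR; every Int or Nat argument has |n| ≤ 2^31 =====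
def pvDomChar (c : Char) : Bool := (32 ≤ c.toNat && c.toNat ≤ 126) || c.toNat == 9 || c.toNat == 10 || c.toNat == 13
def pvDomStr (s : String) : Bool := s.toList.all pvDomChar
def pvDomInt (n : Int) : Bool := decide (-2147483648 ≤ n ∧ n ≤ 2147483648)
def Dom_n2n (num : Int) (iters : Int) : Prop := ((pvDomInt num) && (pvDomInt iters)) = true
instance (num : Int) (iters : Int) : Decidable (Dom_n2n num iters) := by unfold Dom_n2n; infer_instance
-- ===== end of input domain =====

-- B replaces A's sequential per-digit remainder loop by a bounded exact warm-up followed by a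
-- parallel adjacent-difference map with a closed-form mod-10 tSum recurrence (no remainder
-- accumulator, no per-digit str/int round-trips); measured constant-factor faster.

-- ===== PORT A =====
-- int(x) for a one-character string x (under Pre_ the character is always a decimal digit)
def n2nChrInt (c : Char) : Int := (PySem.Int.ofChars? [c]).getD 0

-- int(str(v)[-1])  (str(v) is never empty, so the pyGetD default is never read)
def n2nLastDigit (v : Int) : Int :=
  n2nChrInt (PySem.List.pyGetD (PySem.Int.toChars v) (-1) ' ')

-- body of A's inner 'for x in range(0, len(numLi))' loop:
--   numLi[x] = int(str(numLi[x]+pSum)[-1]); pSum -= numLi[x]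
def n2nStepInnerA (st : List Int × Int) (x : Int) : List Int × Int :=
  let nd := n2nLastDigit (PySem.List.pyGetD st.1 x 0 + st.2)
  (PySem.List.pySetD st.1 x nd, st.2 - nd)

-- body of A's outer 'for _ in range(0, iters)' loop, state (numLi, tSum, pSum)
def n2nStepA (st : List Int × Int × Int) (_i : Int) : List Int × Int × Int :=
  let inner := (PySem.List.pyRange 0 (PySem.List.len st.1)).foldl n2nStepInnerA (st.1, st.2.2)
  let t' := st.2.1 + (inner.1.sum + 1)
  (inner.1, t', t')

def n2n (num : Int) (iters : Int) : Int :=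
  let numLi := (PySem.Int.toChars num).map n2nChrInt
  let tSum := (numLi.sum + 1) ^ 2
  let st := (PySem.List.pyRange 0 iters).foldl n2nStepA (numLi, tSum, tSum)
  let li := st.1
  let li := if PySem.List.pyGetD li 0 0 = 0
            then PySem.List.pySetD li 0 (PySem.List.pyGetD li 0 0 + 1) else li
  (PySem.Int.ofChars? (PySem.Chars.join [] (li.map PySem.Int.toChars))).getD 0

-- ===== PORT B =====
-- body of B's warm-up inner loop: d[x] = abs(d[x] + p) % 10; p -= d[x]
def n2nWarmInner (st : List Int × Int) (x : Int) : List Int × Int :=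
  let nd : Int := ((PySem.List.pyGetD st.1 x 0 + st.2).natAbs % 10 : Nat)
  (PySem.List.pySetD st.1 x nd, st.2 - nd)

-- B's 'while k < iters and t < 9 * n' warm-up loop (fuel iters.toNat bounds its iterations)
def n2nWarm (n iters : Int) : Nat → List Int × Int × Int → List Int × Int × Int
  | 0, st => st
  | fuel + 1, (d, t, k) =>
      if k < iters ∧ t < 9 * n then
        let inner := (PySem.List.pyRange 0 n).foldl n2nWarmInner (d, t)
        n2nWarm n iters fuel (inner.1, t + (inner.1.sum + 1), k + 1)
      else (d, t, k)

-- body of B's main-phase loop: d = [(d[0]+tm)%10] + [(d[i]-d[i-1])%10 for i in range(1,n)];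
-- tm = (2*tm + last + 1) % 10
def n2nMainStep (n : Int) (st : List Int × Int) (_i : Int) : List Int × Int :=
  let d := st.1
  let tm := st.2
  let last := PySem.List.pyGetD d (-1) 0
  (PySem.Int.mod (PySem.List.pyGetD d 0 0 + tm) 10 ::
     (PySem.List.pyRange 1 n).map
       (fun i => PySem.Int.mod (PySem.List.pyGetD d i 0 - PySem.List.pyGetD d (i - 1) 0) 10),
   PySem.Int.mod (2 * tm + last + 1) 10)

def n2n_alt (num : Int) (iters : Int) : Int :=
  let d0 := (PySem.Int.toChars num).map (fun c => (c.toNat : Int) - 48)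
  let n := PySem.List.len d0
  let t := (d0.sum + 1) ^ 2
  let w := n2nWarm n iters iters.toNat (d0, t, 0)
  let st := (PySem.List.pyRange w.2.2 iters).foldl (n2nMainStep n) (w.1, PySem.Int.mod w.2.1 10)
  let d := st.1
  let d := if PySem.List.pyGetD d 0 0 = 0 then PySem.List.pySetD d 0 1 else d
  (PySem.Int.ofChars? (PySem.Chars.join [] (d.map PySem.Int.toChars))).getD 0

-- ===== PRECONDITION & SPEC =====
-- Pre_ excludes negative num, on which A raises ValueError (int() applied to the '-' sign character).
def Pre_n2n (num : Int) (iters : Int) : Prop := 0 ≤ num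
instance (num : Int) (iters : Int) : Decidable (Pre_n2n num iters) := by unfold Pre_n2n; infer_instance
def pvWitness_n2n : Int × Int := (19264, 3)

def Spec_n2n (num : Int) (iters : Int) (out : Int) : Prop := out = n2n_alt num iters
instance (num : Int) (iters : Int) (out : Int) : Decidable (Spec_n2n num iters out) := by unfold Spec_n2n; infer_instance

-- ===== CLAIM (what is proved, stated in full; the proofs are below) =====
def Claim_equal_n2n : Prop := ∀ (num : Int) (iters : Int), Dom_n2n num iters → Pre_n2n num iters → Spec_n2n num iters (n2n num iters)

-- ===== LEMMAS AND PROOFS =====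

-- functional form of one exact pass, and the outer step it induces
def pvF (st : List Int × Int) (x : Int) : List Int × Int :=
  let nd : Int := ((x + st.2).natAbs % 10 : Nat)
  (st.1 ++ [nd], st.2 - nd)

def pvPass (d : List Int) (t : Int) : List Int := (d.foldl pvF ([], t)).1

def pvEA (st : List Int × Int) : List Int × Int :=
  let d' := pvPass st.1 st.2
  (d', st.2 + (d'.sum + 1))

-- the adjacent-difference pass (its parameter only matters mod 10)
def pvDiff : List Int → Int → List Int
  | [], _ => []
  | x :: r, q => PySem.Int.mod (x + q) 10 :: pvDiff r (-x)

-- digits nonempty and in range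
def pvInv (d : List Int) : Prop := d ≠ [] ∧ ∀ y ∈ d, 0 ≤ y ∧ y < 10

-- ---------- string-side lemmas (shared by both ports' parsing / A's inner digit) ----------

theorem pv_toDigitsCore_eq (f : Nat) : ∀ (n : Nat) (acc : List Char), n < f →
    Nat.toDigitsCore 10 f n acc
      = (if n = 0 then ['0'] else ((Nat.digits 10 n).map Nat.digitChar).reverse) ++ acc := by
  induction f with
  | zero => intro n acc h; omega
  | succ f ih =>
    intro n acc h
    rw [Nat.toDigitsCore]
    by_cases h0 : n / 10 = 0
    · simp only [h0, if_true]
      by_cases hn : n = 0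
      · subst hn; simp [Nat.digitChar]
      · have h10 : n < 10 := by omega
        rw [if_neg hn, Nat.digits_def' (by omega : 1 < 10) (by omega : 0 < n), h0]
        simp [Nat.mod_eq_of_lt h10]
    · rw [if_neg h0, ih (n / 10) _ (by omega)]
      have hn : n ≠ 0 := by omega
      rw [if_neg h0, if_neg hn, Nat.digits_def' (by omega : 1 < 10) (by omega : 0 < n)]
      simp

theorem pv_toChars_natCast (m : Nat) :
    PySem.Int.toChars (m : Int)
      = if m = 0 then ['0'] else ((Nat.digits 10 m).map Nat.digitChar).reverse := by
  unfold PySem.Int.toChars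
  rw [if_neg (by omega)]
  unfold Nat.toDigits
  rw [pv_toDigitsCore_eq (Int.toNat m + 1) _ _ (by omega)]
  simp

theorem pv_chrInt_digitChar (d : Nat) (h : d < 10) : n2nChrInt (Nat.digitChar d) = (d : Int) := by
  interval_cases d <;> decide

theorem pv_digitChar_toNat (d : Nat) (h : d < 10) :
    ((Nat.digitChar d).toNat : Int) - 48 = (d : Int) := by
  interval_cases d <;> decide

theorem pv_toDigits_getLast? (m : Nat) :
    (Nat.toDigits 10 m).getLast? = some (Nat.digitChar (m % 10)) := by
  unfold Nat.toDigits
  rw [pv_toDigitsCore_eq (m + 1) m [] (by omega), List.append_nil]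
  by_cases h0 : m = 0
  · subst h0; simp; decide
  · rw [if_neg h0, List.getLast?_reverse]
    rw [Nat.digits_def' (by omega : 1 < 10) (by omega : 0 < m)]
    simp

theorem pv_toDigits_ne_nil (m : Nat) : Nat.toDigits 10 m ≠ [] := by
  intro hc
  have h := pv_toDigits_getLast? m
  rw [hc] at h
  simp at h

-- int(str(v)[-1]) = |v| % 10
theorem pv_lastDigit_eq (v : Int) : n2nLastDigit v = ((v.natAbs % 10 : Nat) : Int) := by
  unfold n2nLastDigit
  unfold PySem.Int.toChars
  by_cases hv : v < 0
  · rw [if_pos hv]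
    have hne := pv_toDigits_ne_nil v.natAbs
    rw [PySem.List.pyGetD_neg_one _ _ (by simp)]
    rw [List.getLast_cons hne]
    have h2 := pv_toDigits_getLast? v.natAbs
    rw [List.getLast?_eq_some_getLast hne] at h2
    rw [Option.some.inj h2]
    exact pv_chrInt_digitChar _ (by omega)
  · rw [if_neg hv]
    have hne := pv_toDigits_ne_nil v.toNat
    rw [PySem.List.pyGetD_neg_one _ _ hne]
    have h2 := pv_toDigits_getLast? v.toNat
    rw [List.getLast?_eq_some_getLast hne] at h2
    rw [Option.some.inj h2]
    rw [show v.toNat = v.natAbs by omega]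
    exact pv_chrInt_digitChar _ (by omega)

-- ---------- the in-place indexed pass equals the functional pass pvF ----------

theorem pv_getD_append (pre : List Int) (x : Int) (suf : List Int) :
    (pre ++ x :: suf).getD pre.length 0 = x := by
  induction pre with
  | nil => rfl
  | cons a l ih => simpa using ih

theorem pv_set_append (pre : List Int) (x nd : Int) (suf : List Int) :
    (pre ++ x :: suf).set pre.length nd = pre ++ nd :: suf := by
  induction pre with
  | nil => rfl
  | cons a l ih => simpa using ih

theorem pv_inner_aux (suf : List Int) : ∀ (pre : List Int) (p : Int),
    (PySem.List.pyRange (pre.length : Int) ((pre.length + suf.length : Nat) : Int)).foldl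
        n2nWarmInner (pre ++ suf, p)
      = suf.foldl pvF (pre, p) := by
  induction suf with
  | nil =>
    intro pre p
    simp [PySem.List.pyRange]
  | cons x suf ih =>
    intro pre p
    rw [PySem.List.pyRange_one_cons (by push_cast [List.length_cons]; omega)]
    rw [List.foldl_cons, List.foldl_cons]
    have hstep : n2nWarmInner (pre ++ x :: suf, p) (pre.length : Int)
        = (pre ++ (((x + p).natAbs % 10 : Nat) : Int) :: suf,
           p - (((x + p).natAbs % 10 : Nat) : Int)) := by
      unfold n2nWarmInner
      simp only [PySem.List.pyGetD_natCast, PySem.List.pySetD_natCast,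
        pv_getD_append, pv_set_append]
    rw [hstep]
    have hcast : ((pre.length : Int) + 1)
        = (((pre ++ [(((x + p).natAbs % 10 : Nat) : Int)]).length : Nat) : Int) := by
      push_cast; simp
    rw [hcast]
    have hlist : pre ++ (((x + p).natAbs % 10 : Nat) : Int) :: suf
        = (pre ++ [(((x + p).natAbs % 10 : Nat) : Int)]) ++ suf := by simp
    have hlen : ((pre.length + (x :: suf).length : Nat) : Int)
        = (((pre ++ [(((x + p).natAbs % 10 : Nat) : Int)]).length + suf.length : Nat) : Int) := by
      push_cast [List.length_cons]; simp; omega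
    rw [hlen, hlist, ih]
    rfl

theorem pv_inner_eq (li : List Int) (p : Int) :
    (PySem.List.pyRange 0 ((li.length : Nat) : Int)).foldl n2nWarmInner (li, p)
      = li.foldl pvF ([], p) := by
  have h := pv_inner_aux li [] p
  simpa using h

theorem pv_innerA_warm : n2nStepInnerA = n2nWarmInner := by
  funext st x
  unfold n2nStepInnerA n2nWarmInner
  rw [pv_lastDigit_eq]

-- ---------- basic facts about the functional pass ----------

theorem pv_foldF_length (d : List Int) : ∀ (out : List Int) (p : Int),
    (d.foldl pvF (out, p)).1.length = out.length + d.length := by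
  induction d with
  | nil => intro out p; simp
  | cons x r ih =>
    intro out p
    rw [List.foldl_cons]
    show (r.foldl pvF (out ++ [_], _)).1.length = _
    rw [ih]
    simp; omega

theorem pv_pass_length (d : List Int) (t : Int) : (pvPass d t).length = d.length := by
  unfold pvPass
  rw [pv_foldF_length]
  simp

theorem pv_foldF_range (d : List Int) : ∀ (out : List Int) (p : Int),
    (∀ y ∈ out, 0 ≤ y ∧ y < 10) → ∀ y ∈ (d.foldl pvF (out, p)).1, 0 ≤ y ∧ y < 10 := by
  induction d with
  | nil => intro out p h; simpa using h
  | cons x r ih =>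
    intro out p h
    rw [List.foldl_cons]
    refine ih _ _ ?_
    intro y hy
    rcases List.mem_append.mp hy with h1 | h1
    · exact h y h1
    · simp at h1
      subst h1
      constructor <;> omega

theorem pv_pass_range (d : List Int) (t : Int) :
    ∀ y ∈ pvPass d t, 0 ≤ y ∧ y < 10 := by
  unfold pvPass
  exact pv_foldF_range d [] t (by simp)

theorem pv_pass_sum_nonneg (d : List Int) (t : Int) : 0 ≤ (pvPass d t).sum :=
  List.sum_nonneg (fun y hy => (pv_pass_range d t y hy).1)

theorem pv_EA_inv (d : List Int) (t : Int) (h : pvInv d) : pvInv (pvEA (d, t)).1 := by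
  refine ⟨?_, pv_pass_range d t⟩
  have hl := pv_pass_length d t
  intro hc
  rw [show (pvEA (d, t)).1 = pvPass d t from rfl] at hc
  rw [hc] at hl
  exact h.1 (List.length_eq_zero_iff.mp hl.symm)

theorem pv_EA_length (d : List Int) (t : Int) : (pvEA (d, t)).1.length = d.length :=
  pv_pass_length d t

theorem pv_EA_snd (d : List Int) (t : Int) :
    (pvEA (d, t)).2 = t + ((pvPass d t).sum + 1) := rfl

-- ---------- the difference map ----------

theorem pv_natAbs_mod (v : Int) (hv : 0 ≤ v) : ((v.natAbs % 10 : Nat) : Int) = v % 10 := by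
  omega

theorem pv_diff_congr (d : List Int) : ∀ q1 q2 : Int, q1 % 10 = q2 % 10 →
    pvDiff d q1 = pvDiff d q2 := by
  induction d with
  | nil => intros; rfl
  | cons x r ih =>
    intro q1 q2 h
    simp only [pvDiff, PySem.Int.mod_eq_emod_of_pos (show (0:Int) < 10 by norm_num)]
    congr 1
    omega

-- the exact pass IS the difference map once the parameter dominates 9 per remaining digit
theorem pv_pass_diff (d : List Int) : ∀ (q : Int) (out : List Int),
    (∀ y ∈ d, 0 ≤ y ∧ y < 10) →
    (d ≠ [] → 9 * ((d.length : Int) - 1) ≤ q ∧ 0 ≤ q) →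
    (d.foldl pvF (out, q)).1 = out ++ pvDiff d q := by
  induction d with
  | nil => intro q out _ _; simp [pvDiff]
  | cons x r ih =>
    intro q out hd hq
    obtain ⟨hq1, hq2⟩ := hq (by simp)
    have hx := hd x (by simp)
    have hxq : 0 ≤ x + q := by omega
    have hstep : pvF (out, q) x = (out ++ [(x + q) % 10], q - (x + q) % 10) := by
      simp only [pvF]
      rw [pv_natAbs_mod _ hxq]
    rw [List.foldl_cons, hstep]
    have hlen : r ≠ [] → (1 : Int) ≤ (r.length : Int) := by
      intro hne
      have := List.length_pos_iff.mpr hne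
      omega
    rw [ih (q - (x + q) % 10) (out ++ [(x + q) % 10])
          (fun y hy => hd y (by simp [hy]))
          (fun hne => by
            have h1 := hlen hne
            have hc : (((x :: r).length : Int)) = (r.length : Int) + 1 := by
              push_cast [List.length_cons]; ring
            rw [hc] at hq1
            constructor <;> omega)]
    rw [pv_diff_congr r _ (-x) (by omega)]
    simp only [pvDiff, PySem.Int.mod_eq_emod_of_pos (show (0:Int) < 10 by norm_num)]
    simp

theorem pv_pass_eq_diff (d : List Int) (t : Int) (h : pvInv d)
    (ht : 9 * (d.length : Int) ≤ t) : pvPass d t = pvDiff d t := by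
  unfold pvPass
  rw [pv_pass_diff d t [] h.2 (fun _ => by
    have h1 : (1 : Int) ≤ (d.length : Int) := by
      have := List.length_pos_iff.mpr h.1
      omega
    constructor <;> omega)]
  simp

-- B's comprehension form of the difference map
theorem pv_diff_map (r : List Int) : ∀ x : Int,
    (List.range r.length).map
        (fun k => PySem.Int.mod ((x :: r).getD (k + 1) 0 - (x :: r).getD k 0) 10)
      = pvDiff r (-x) := by
  induction r with
  | nil => intro x; rfl
  | cons y s ih =>
    intro x
    rw [List.length_cons, List.range_succ_eq_map, List.map_cons, List.map_map]
    rw [show pvDiff (y :: s) (-x) = PySem.Int.mod (y + -x) 10 :: pvDiff s (-y) from rfl]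
    congr 1
    rw [← ih y]
    apply List.map_congr_left
    intro k _
    simp [List.getD_cons_succ]

theorem pv_mainlist_eq (x : Int) (r : List Int) (q : Int) :
    (PySem.Int.mod (PySem.List.pyGetD (x :: r) 0 0 + q) 10 ::
       (PySem.List.pyRange 1 (((x :: r).length : Nat) : Int)).map
         (fun i => PySem.Int.mod
            (PySem.List.pyGetD (x :: r) i 0 - PySem.List.pyGetD (x :: r) (i - 1) 0) 10))
      = pvDiff (x :: r) q := by
  have hrange : PySem.List.pyRange 1 (((x :: r).length : Nat) : Int)
      = (List.range r.length).map (fun k => ((k + 1 : Nat) : Int)) := by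
    rw [PySem.List.pyRange_one]
    have : ((((x :: r).length : Nat) : Int) - 1).toNat = r.length := by
      simp [List.length_cons]
    rw [this]
    apply List.map_congr_left
    intro k _
    push_cast
    ring
  rw [hrange, List.map_map]
  have hmap : (List.range r.length).map
        ((fun i => PySem.Int.mod
            (PySem.List.pyGetD (x :: r) i 0 - PySem.List.pyGetD (x :: r) (i - 1) 0) 10)
          ∘ (fun k => ((k + 1 : Nat) : Int)))
      = (List.range r.length).map
        (fun k => PySem.Int.mod ((x :: r).getD (k + 1) 0 - (x :: r).getD k 0) 10) := by
    apply List.map_congr_left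
    intro k _
    simp only [Function.comp_apply]
    have h1 : ((k + 1 : Nat) : Int) - 1 = ((k : Nat) : Int) := by push_cast; ring
    rw [h1, PySem.List.pyGetD_natCast, PySem.List.pyGetD_natCast]
  rw [hmap, pv_diff_map r x]
  simp only [pvDiff, PySem.List.pyGetD_zero_cons]

theorem pv_diff_sum (d : List Int) : ∀ q : Int, d ≠ [] →
    (pvDiff d q).sum % 10 = (q + d.getLast?.getD 0) % 10 := by
  induction d with
  | nil => intro q h; exact absurd rfl h
  | cons x r ih =>
    intro q _
    cases r with
    | nil =>
      simp [pvDiff, PySem.Int.mod_eq_emod_of_pos (show (0:Int) < 10 by norm_num)]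
      omega
    | cons y s =>
      have hih := ih (-x) (by simp)
      rw [show pvDiff (x :: y :: s) q = PySem.Int.mod (x + q) 10 :: pvDiff (y :: s) (-x) from rfl]
      rw [List.sum_cons, PySem.Int.mod_eq_emod_of_pos (show (0:Int) < 10 by norm_num)]
      rw [show (x :: y :: s).getLast? = (y :: s).getLast? from List.getLast?_cons_cons]
      omega


-- ---------- one main-phase step = one exact pass (t large) ----------

theorem pv_mainstep_eq (x : Int) (r : List Int) (t i : Int)
    (h : ∀ y ∈ x :: r, 0 ≤ y ∧ y < 10)
    (ht : 9 * (((x :: r).length : Nat) : Int) ≤ t) :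
    n2nMainStep (((x :: r).length : Nat) : Int) (x :: r, t % 10) i
      = ((pvEA (x :: r, t)).1, (pvEA (x :: r, t)).2 % 10) := by
  have hne : (x :: r) ≠ [] := by simp
  have hinv : pvInv (x :: r) := ⟨hne, h⟩
  have hms : n2nMainStep (((x :: r).length : Nat) : Int) (x :: r, t % 10) i
      = (PySem.Int.mod (PySem.List.pyGetD (x :: r) 0 0 + t % 10) 10 ::
           (PySem.List.pyRange 1 (((x :: r).length : Nat) : Int)).map
             (fun j => PySem.Int.mod
                (PySem.List.pyGetD (x :: r) j 0 - PySem.List.pyGetD (x :: r) (j - 1) 0) 10),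
         PySem.Int.mod (2 * (t % 10) + PySem.List.pyGetD (x :: r) (-1) 0 + 1) 10) := rfl
  rw [hms]
  have hpass := pv_pass_eq_diff (x :: r) t hinv ht
  have hfst : (PySem.Int.mod (PySem.List.pyGetD (x :: r) 0 0 + t % 10) 10 ::
        (PySem.List.pyRange 1 (((x :: r).length : Nat) : Int)).map
          (fun j => PySem.Int.mod
             (PySem.List.pyGetD (x :: r) j 0 - PySem.List.pyGetD (x :: r) (j - 1) 0) 10))
      = (pvEA (x :: r, t)).1 := by
    rw [pv_mainlist_eq x r (t % 10)]
    rw [pv_diff_congr (x :: r) (t % 10) t (by omega)]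
    show pvDiff (x :: r) t = (pvEA (x :: r, t)).1
    rw [show (pvEA (x :: r, t)).1 = pvPass (x :: r) t from rfl, hpass]
  rw [hfst]
  have hlast : PySem.List.pyGetD (x :: r) (-1) 0 = (x :: r).getLast?.getD 0 := by
    rw [PySem.List.pyGetD_neg_one _ _ hne, List.getLast?_eq_some_getLast hne]
    rfl
  have hsum : (pvDiff (x :: r) t).sum % 10 = (t + (x :: r).getLast?.getD 0) % 10 :=
    pv_diff_sum (x :: r) t hne
  have hsnd : PySem.Int.mod (2 * (t % 10) + PySem.List.pyGetD (x :: r) (-1) 0 + 1) 10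
      = (pvEA (x :: r, t)).2 % 10 := by
    rw [hlast, PySem.Int.mod_eq_emod_of_pos (show (0:Int) < 10 by norm_num)]
    rw [show (pvEA (x :: r, t)).2 = t + (pvPass (x :: r) t).sum + 1 from by
      rw [pv_EA_snd]; ring]
    rw [hpass]
    omega
  rw [hsnd]

-- ---------- main-phase fold = iterated exact pass ----------

theorem pv_main_iter (L : List Int) : ∀ (d : List Int) (t : Int), pvInv d →
    9 * ((d.length : Nat) : Int) ≤ t →
    L.foldl (n2nMainStep ((d.length : Nat) : Int)) (d, t % 10)
      = ((pvEA^[L.length] (d, t)).1, (pvEA^[L.length] (d, t)).2 % 10) := by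
  induction L with
  | nil => intro d t _ _; simp
  | cons i L ih =>
    intro d t h ht
    obtain ⟨x, r, rfl⟩ := List.exists_cons_of_ne_nil h.1
    rw [List.foldl_cons, pv_mainstep_eq x r t i h.2 ht]
    have hlen : (pvEA (x :: r, t)).1.length = (x :: r).length := pv_EA_length (x :: r) t
    have hs := pv_pass_sum_nonneg (x :: r) t
    have h2 : 9 * (((pvEA (x :: r, t)).1.length : Nat) : Int) ≤ (pvEA (x :: r, t)).2 := by
      rw [hlen, pv_EA_snd]
      omega
    have hstep := ih (pvEA (x :: r, t)).1 (pvEA (x :: r, t)).2 (pv_EA_inv (x :: r) t h) h2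
    rw [hlen] at hstep
    rw [hstep]
    rw [show ((pvEA (x :: r, t)).1, (pvEA (x :: r, t)).2) = pvEA (x :: r, t) from rfl]
    rw [List.length_cons, Function.iterate_succ_apply]

-- ---------- A's outer loop = iterated exact pass ----------

theorem pv_outerA (L : List Int) : ∀ (d : List Int) (t : Int),
    L.foldl n2nStepA (d, t, t)
      = ((pvEA^[L.length] (d, t)).1, (pvEA^[L.length] (d, t)).2, (pvEA^[L.length] (d, t)).2) := by
  induction L with
  | nil => intro d t; simp
  | cons i L ih =>
    intro d t
    have hstep : n2nStepA (d, t, t) i = ((pvEA (d, t)).1, (pvEA (d, t)).2, (pvEA (d, t)).2) := by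
      have h1 : n2nStepA (d, t, t) i
          = (((PySem.List.pyRange 0 (PySem.List.len d)).foldl n2nStepInnerA (d, t)).1,
             t + ((((PySem.List.pyRange 0 (PySem.List.len d)).foldl n2nStepInnerA (d, t)).1).sum + 1),
             t + ((((PySem.List.pyRange 0 (PySem.List.len d)).foldl n2nStepInnerA (d, t)).1).sum + 1)) := rfl
      rw [h1, pv_innerA_warm,
        show PySem.List.len d = ((d.length : Nat) : Int) from by simp,
        pv_inner_eq]
      rfl
    rw [List.foldl_cons, hstep, ih, List.length_cons]
    rw [show ((pvEA (d, t)).1, (pvEA (d, t)).2) = pvEA (d, t) from rfl]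
    rw [Function.iterate_succ_apply]

-- ---------- B's warm-up then main phase = iterated exact pass ----------

theorem pv_warm : ∀ (fuel : Nat) (d : List Int) (t k iters : Int), pvInv d → 0 ≤ t →
    (iters - k).toNat ≤ fuel →
    ((PySem.List.pyRange (n2nWarm ((d.length : Nat) : Int) iters fuel (d, t, k)).2.2 iters).foldl
        (n2nMainStep ((d.length : Nat) : Int))
        ((n2nWarm ((d.length : Nat) : Int) iters fuel (d, t, k)).1,
         PySem.Int.mod (n2nWarm ((d.length : Nat) : Int) iters fuel (d, t, k)).2.1 10)).1
      = (pvEA^[(iters - k).toNat] (d, t)).1 := by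
  intro fuel
  induction fuel with
  | zero =>
    intro d t k iters _ _ hf
    have hk : iters ≤ k := by omega
    show ((PySem.List.pyRange k iters).foldl (n2nMainStep ((d.length : Nat) : Int))
            (d, PySem.Int.mod t 10)).1 = (pvEA^[(iters - k).toNat] (d, t)).1
    rw [PySem.List.pyRange_one_eq_nil hk]
    rw [show (iters - k).toNat = 0 from by omega]
    rfl
  | succ fuel ih =>
    intro d t k iters hinv ht hf
    have hunf : n2nWarm ((d.length : Nat) : Int) iters (fuel + 1) (d, t, k)
        = if k < iters ∧ t < 9 * ((d.length : Nat) : Int) then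
            n2nWarm ((d.length : Nat) : Int) iters fuel
              ((((PySem.List.pyRange 0 ((d.length : Nat) : Int)).foldl n2nWarmInner (d, t)).1),
               t + (((((PySem.List.pyRange 0 ((d.length : Nat) : Int)).foldl n2nWarmInner (d, t)).1)).sum + 1),
               k + 1)
          else (d, t, k) := rfl
    by_cases hc : k < iters ∧ t < 9 * ((d.length : Nat) : Int)
    · rw [hunf, if_pos hc]
      have hin : ((PySem.List.pyRange 0 ((d.length : Nat) : Int)).foldl n2nWarmInner (d, t)).1
          = pvPass d t := by
        rw [pv_inner_eq]
        rfl
      rw [hin]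
      have hlen : (pvPass d t).length = d.length := pv_pass_length d t
      have hs := pv_pass_sum_nonneg d t
      have hinv' : pvInv (pvPass d t) := pv_EA_inv d t hinv
      have hih := ih (pvPass d t) (t + ((pvPass d t).sum + 1)) (k + 1) iters hinv'
        (by omega) (by omega)
      rw [hlen] at hih
      rw [hih]
      rw [show (pvPass d t, t + ((pvPass d t).sum + 1)) = pvEA (d, t) from rfl]
      rw [show (iters - k).toNat = (iters - (k + 1)).toNat + 1 from by omega]
      rw [Function.iterate_succ_apply]
    · rw [hunf, if_neg hc]
      push_neg at hc
      show ((PySem.List.pyRange k iters).foldl (n2nMainStep ((d.length : Nat) : Int))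
              (d, PySem.Int.mod t 10)).1 = (pvEA^[(iters - k).toNat] (d, t)).1
      by_cases hk : k < iters
      · have ht9 : 9 * ((d.length : Nat) : Int) ≤ t := hc hk
        rw [show PySem.Int.mod t 10 = t % 10 from
          PySem.Int.mod_eq_emod_of_pos (show (0:Int) < 10 by norm_num)]
        rw [pv_main_iter (PySem.List.pyRange k iters) d t hinv ht9]
        rw [PySem.List.length_pyRange_one]
      · have hk2 : iters ≤ k := by omega
        rw [PySem.List.pyRange_one_eq_nil hk2]
        rw [show (iters - k).toNat = 0 from by omega]
        rfl

-- ---------- parsing: both ports produce the same digit list, nonempty and in range ----------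

theorem pv_parse_eq_B (num : Int) (h : 0 ≤ num) :
    (PySem.Int.toChars num).map (fun c => ((c.toNat : Int) - 48))
      = (PySem.Int.toChars num).map n2nChrInt := by
  obtain ⟨m, rfl⟩ := Int.eq_ofNat_of_zero_le h
  rw [pv_toChars_natCast]
  by_cases h0 : m = 0
  · subst h0; simp; decide
  · rw [if_neg h0]
    simp only [List.map_reverse, List.map_map]
    congr 1
    apply List.map_congr_left
    intro k hk
    have hlt := Nat.digits_lt_base (by omega) hk
    simp only [Function.comp_apply]
    rw [pv_digitChar_toNat k hlt, pv_chrInt_digitChar k hlt]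

theorem pv_parse_inv (num : Int) (h : 0 ≤ num) :
    pvInv ((PySem.Int.toChars num).map n2nChrInt) := by
  obtain ⟨m, rfl⟩ := Int.eq_ofNat_of_zero_le h
  rw [pv_toChars_natCast]
  by_cases h0 : m = 0
  · subst h0
    constructor
    · simp
    · intro y hy
      simp at hy
      subst hy
      constructor <;> decide
  · rw [if_neg h0]
    constructor
    · simp [Nat.digits_ne_nil_iff_ne_zero.mpr h0]
    · intro y hy
      simp only [List.map_reverse, List.mem_reverse, List.mem_map] at hy
      obtain ⟨c, hc, rfl⟩ := hy
      obtain ⟨k, hk, rfl⟩ := hc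
      have hlt := Nat.digits_lt_base (by omega) hk
      rw [pv_chrInt_digitChar k hlt]
      constructor <;> omega

-- A's leading-zero bump (read + add 1) equals B's (write 1)
theorem pv_bump_eq (L : List Int) :
    (if PySem.List.pyGetD L 0 0 = 0 then PySem.List.pySetD L 0 (PySem.List.pyGetD L 0 0 + 1) else L)
      = (if PySem.List.pyGetD L 0 0 = 0 then PySem.List.pySetD L 0 1 else L) := by
  split_ifs with h
  · rw [h]
    norm_num
  · rfl

-- ===== VERDICT (by name: the statement is the Claim_ definition above) =====
theorem n2n_spec : Claim_equal_n2n := by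
  intro num iters _hdom hpre
  unfold Spec_n2n n2n n2n_alt
  rw [pv_parse_eq_B num hpre]
  have hinv := pv_parse_inv num hpre
  have hT : (0 : Int) ≤ ((((PySem.Int.toChars num).map n2nChrInt).sum + 1) ^ 2) := sq_nonneg _
  have hw := pv_warm iters.toNat ((PySem.Int.toChars num).map n2nChrInt)
      ((((PySem.Int.toChars num).map n2nChrInt).sum + 1) ^ 2) 0 iters hinv hT (by omega)
  simp only [PySem.List.len_eq, sub_zero] at hw ⊢
  rw [hw]
  simp only [pv_outerA, PySem.List.length_pyRange_one, sub_zero, pv_bump_eq]
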